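-- pv_equiv track=rewrite | github.com/bernardev254/dsa-4-thinking | sortWithParity/sortWithParity.py | sortWithParity
-- ===== SOURCE A (Python) =====
-- def sortWithParity(unsorted):
--     #sortedList = []
--     even = []
--     odd = []
--     if unsorted is not None:
--         for elem in sorted(unsorted):
--             if elem == 0:
--                 even.append(elem)
--             elif elem % 2 == 0:
--                 even.append(elem)
--             else:
--                 odd.append(elem)
--
--     sortedList = even + odd
--     return sortedList
-- ===== SOURCE B (Python) =====
-- def sortWithParity(unsorted):
--     if unsorted is None:
--         return []
--     return sorted(unsorted, key=lambda x: (x % 2, x))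
-- ===== Notes on version B (the rewrite author's own statement) =====
-- stated objective: idiomatic
-- what changed: Replaces the sort-then-partition-into-two-lists-and-concatenate loop by a single sorted() call with the composite key (x % 2, x), which orders evens before odds directly.
import Mathlib
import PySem

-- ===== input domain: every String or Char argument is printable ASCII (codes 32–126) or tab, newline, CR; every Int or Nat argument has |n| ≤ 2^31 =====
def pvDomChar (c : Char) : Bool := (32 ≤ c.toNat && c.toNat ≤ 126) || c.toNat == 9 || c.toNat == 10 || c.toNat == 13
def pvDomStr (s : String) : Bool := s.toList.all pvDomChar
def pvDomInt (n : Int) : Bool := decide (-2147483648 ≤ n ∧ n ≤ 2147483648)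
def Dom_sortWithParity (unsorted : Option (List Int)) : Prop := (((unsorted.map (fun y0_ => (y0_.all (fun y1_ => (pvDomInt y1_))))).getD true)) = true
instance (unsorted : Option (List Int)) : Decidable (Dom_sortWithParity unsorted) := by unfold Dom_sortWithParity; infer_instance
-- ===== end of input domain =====

-- B replaces A's sort + partition-into-two-lists-and-concatenate loop by one
-- sorted() call with the composite key (x % 2, x) (idiomatic; same cost).

-- ===== PORT A =====
def sortWithParity (unsorted : Option (List Int)) : List Int :=
  -- even = [], odd = []; if unsorted is not None: loop over sorted(unsorted)
  let eo : List Int × List Int :=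
    match unsorted with
    | none => ([], [])
    | some xs =>
      (PySem.List.sorted xs (fun x => x)).foldl
        (fun eo elem =>
          if elem == 0 then (eo.1 ++ [elem], eo.2)
          else if PySem.Int.mod elem 2 == 0 then (eo.1 ++ [elem], eo.2)
          else (eo.1, eo.2 ++ [elem]))
        ([], [])
  eo.1 ++ eo.2

-- ===== PORT B =====
def sortWithParity_alt (unsorted : Option (List Int)) : List Int :=
  match unsorted with
  | none => []
  | some xs => PySem.List.sorted2 xs (fun x => PySem.Int.mod x 2) (fun x => x)

-- ===== PRECONDITION & SPEC =====
def Spec_sortWithParity (unsorted : Option (List Int)) (out : List Int) : Prop := out = sortWithParity_alt unsorted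
instance (unsorted : Option (List Int)) (out : List Int) : Decidable (Spec_sortWithParity unsorted out) := by unfold Spec_sortWithParity; infer_instance

-- ===== CLAIM (what is proved, stated in full; the proofs are below) =====
def Claim_equal_sortWithParity : Prop := ∀ (unsorted : Option (List Int)), Dom_sortWithParity unsorted → Spec_sortWithParity unsorted (sortWithParity unsorted)

-- ===== LEMMAS AND PROOFS =====

-- Python's x % 2 (fmod) is Lean's emod for the positive divisor 2
theorem pymod2_eq_emod (x : Int) : PySem.Int.mod x 2 = x % 2 := by
  simp [PySem.Int.mod, Int.fmod_eq_emod]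

-- the single Int key encoding the lexicographic pair (x % 2, x) on bounded ints
def pvKey (x : Int) : Int := (PySem.Int.mod x 2) * 8589934592 + x

theorem pvKey_injective : Function.Injective pvKey := by
  intro a b h
  simp only [pvKey, pymod2_eq_emod] at h
  rcases Int.emod_two_eq a with h1 | h1 <;> rcases Int.emod_two_eq b with h2 | h2 <;>
    rw [h1, h2] at h <;> omega

-- A's even-test as a Bool predicate
def pvEven (x : Int) : Bool := x == 0 || PySem.Int.mod x 2 == 0

theorem pvEven_iff (x : Int) : pvEven x = true ↔ x % 2 = 0 := by
  simp only [pvEven, pymod2_eq_emod, Bool.or_eq_true, beq_iff_eq]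
  omega

-- insertBy only looks at `before` on (x, member of ys)
theorem insertBy_congr {α : Type} (b1 b2 : α → α → Bool) (x : α) (ys : List α)
    (h : ∀ y ∈ ys, b1 x y = b2 x y) :
    PySem.List.insertBy b1 x ys = PySem.List.insertBy b2 x ys := by
  induction ys with
  | nil => rfl
  | cons y ys ih =>
    simp only [PySem.List.insertBy]
    rw [h y (by simp)]
    split
    · rfl
    · rw [ih (fun z hz => h z (by simp [hz]))]

theorem foldl_insertBy_congr {α : Type} (b1 b2 : α → α → Bool) (S : α → Prop)
    (hagree : ∀ a b, S a → S b → b1 a b = b2 a b) :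
    ∀ (xs acc : List α), (∀ x ∈ xs, S x) → (∀ x ∈ acc, S x) →
      xs.foldl (fun acc x => PySem.List.insertBy b1 x acc) acc
        = xs.foldl (fun acc x => PySem.List.insertBy b2 x acc) acc := by
  intro xs
  induction xs with
  | nil => intro acc _ _; rfl
  | cons x xs ih =>
    intro acc hxs hacc
    simp only [List.foldl_cons]
    rw [insertBy_congr b1 b2 x acc
        (fun y hy => hagree x y (hxs x (by simp)) (hacc y hy)), ih]
    · intro z hz; exact hxs z (by simp [hz])
    · intro z hz
      rcases (PySem.List.mem_insertBy b2 x z acc).mp hz with h | h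
      · exact h ▸ hxs x (by simp)
      · exact hacc z h

-- the comparator of sorted2 with keys (x % 2, x) agrees with pvKey's on bounded ints
theorem comparator_eq (a b : Int)
    (ha : -2147483648 ≤ a ∧ a ≤ 2147483648) (hb : -2147483648 ≤ b ∧ b ≤ 2147483648) :
    (decide (PySem.Int.mod a 2 < PySem.Int.mod b 2) ||
      (!decide (PySem.Int.mod b 2 < PySem.Int.mod a 2) && decide (a < b)))
      = decide (pvKey a < pvKey b) := by
  simp only [pvKey, pymod2_eq_emod, ← decide_not, ← Bool.decide_and, ← Bool.decide_or]
  apply (decide_eq_decide).mpr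
  rcases Int.emod_two_eq a with h1 | h1 <;> rcases Int.emod_two_eq b with h2 | h2 <;>
    rw [h1, h2] <;> omega

-- B-side: sorted2 with the pair key equals sorted with pvKey on bounded input
theorem sorted2_eq_sorted_pvKey (xs : List Int)
    (hd : ∀ x ∈ xs, -2147483648 ≤ x ∧ x ≤ 2147483648) :
    PySem.List.sorted2 xs (fun x => PySem.Int.mod x 2) (fun x => x)
      = PySem.List.sorted xs pvKey := by
  rw [PySem.List.sorted_eq_foldl_insertBy]
  show xs.foldl (fun acc x => PySem.List.insertBy _ x acc) [] = _
  exact foldl_insertBy_congr _ _ (fun x => -2147483648 ≤ x ∧ x ≤ 2147483648)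
    (fun a b ha hb => comparator_eq a b ha hb) xs [] hd (by simp)

-- A-side: the partition loop is filter pvEven ++ filter ¬pvEven
theorem pvEven_false_iff (x : Int) : pvEven x = false ↔ x % 2 = 1 := by
  rw [Bool.eq_false_iff, Ne, pvEven_iff]
  omega

theorem foldl_partition (l : List Int) :
    ∀ e o : List Int,
      l.foldl
        (fun eo elem =>
          if elem == 0 then (eo.1 ++ [elem], eo.2)
          else if PySem.Int.mod elem 2 == 0 then (eo.1 ++ [elem], eo.2)
          else (eo.1, eo.2 ++ [elem]))
        (e, o)
      = (e ++ l.filter pvEven, o ++ l.filter (fun x => !pvEven x)) := by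
  induction l with
  | nil => intro e o; simp
  | cons x l ih =>
    intro e o
    rw [List.foldl_cons]
    have hred :
        (if x == 0 then ((e, o).1 ++ [x], (e, o).2)
          else if PySem.Int.mod x 2 == 0 then ((e, o).1 ++ [x], (e, o).2)
          else ((e, o).1, (e, o).2 ++ [x]))
          = (if pvEven x then (e ++ [x], o) else (e, o ++ [x])) := by
      simp only [pvEven]
      by_cases h0 : x = 0 <;> by_cases hm : PySem.Int.mod x 2 = 0 <;> simp [h0, hm]
    rw [hred]
    by_cases hE : pvEven x
    · rw [if_pos hE, ih]
      simp [hE, List.append_assoc]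
    · rw [if_neg hE, ih]
      simp [hE, List.append_assoc]

-- sorted xs pvKey is exactly (sorted evens) ++ (sorted odds), on bounded input
theorem sorted_pvKey_eq_split (xs : List Int)
    (hd : ∀ x ∈ xs, -2147483648 ≤ x ∧ x ≤ 2147483648) :
    PySem.List.sorted xs pvKey
      = (PySem.List.sorted xs (fun x => x)).filter pvEven
          ++ (PySem.List.sorted xs (fun x => x)).filter (fun x => !pvEven x) := by
  set s := PySem.List.sorted xs (fun x => x) with hs
  have hsperm : s.Perm xs := PySem.List.sorted_perm xs _ _
  have hspw : List.Pairwise (fun a b : Int => a ≤ b) s := by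
    simpa using PySem.List.sorted_pairwise xs (fun x => x)
  have hmem : ∀ x ∈ s, -2147483648 ≤ x ∧ x ≤ 2147483648 :=
    fun x hx => hd x (hsperm.mem_iff.mp hx)
  apply PySem.List.eq_of_perm_of_pairwise_le_of_injective pvKey pvKey_injective
  · exact (PySem.List.sorted_perm xs pvKey _).trans
      (((List.filter_append_perm pvEven s).trans hsperm).symm)
  · exact PySem.List.sorted_pairwise xs pvKey
  · rw [List.pairwise_append]
    refine ⟨?_, ?_, ?_⟩
    · refine (hspw.filter pvEven).imp_of_mem ?_
      intro a b ha hb hle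
      have ha' := (List.mem_filter.mp ha)
      have hb' := (List.mem_filter.mp hb)
      have h1 : a % 2 = 0 := (pvEven_iff a).mp ha'.2
      have h2 : b % 2 = 0 := (pvEven_iff b).mp hb'.2
      simp only [pvKey, pymod2_eq_emod]
      rw [h1, h2]
      omega
    · refine (hspw.filter _).imp_of_mem ?_
      intro a b ha hb hle
      have ha' := (List.mem_filter.mp ha)
      have hb' := (List.mem_filter.mp hb)
      have h1' : a % 2 = 1 := (pvEven_false_iff a).mp (by simpa using ha'.2)
      have h2' : b % 2 = 1 := (pvEven_false_iff b).mp (by simpa using hb'.2)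
      simp only [pvKey, pymod2_eq_emod]
      rw [h1', h2']
      omega
    · intro a ha b hb
      have ha' := List.mem_filter.mp ha
      have hb' := List.mem_filter.mp hb
      have h1 : a % 2 = 0 := (pvEven_iff a).mp ha'.2
      have h2' : b % 2 = 1 := (pvEven_false_iff b).mp (by simpa using hb'.2)
      have hba := hmem a ha'.1
      have hbb := hmem b hb'.1
      simp only [pvKey, pymod2_eq_emod]
      rw [h1, h2']
      omega

-- ===== VERDICT (by name: the statement is the Claim_ definition above) =====
theorem sortWithParity_spec : Claim_equal_sortWithParity := by
  intro unsorted hdom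
  unfold Spec_sortWithParity sortWithParity sortWithParity_alt
  cases unsorted with
  | none => rfl
  | some xs =>
    have hd : ∀ x ∈ xs, -2147483648 ≤ x ∧ x ≤ 2147483648 := by
      intro x hx
      have := hdom
      simp only [Dom_sortWithParity, Option.map_some, Option.getD_some,
        List.all_eq_true, pvDomInt, decide_eq_true_eq] at this
      exact this x hx
    simp only [sorted2_eq_sorted_pvKey xs hd, sorted_pvKey_eq_split xs hd,
      foldl_partition, List.nil_append]
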